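-- pv_equiv track=rewrite | github.com/the-walking-agency-det/indiiOS-Clean | optimization/autoagent/eval.py | extract_routing_section
-- ===== SOURCE A (Python) =====
-- def extract_routing_section(prompt: str) -> str:
--     """Extract the routing table section from the Conductor prompt."""
--     lines = prompt.split("\n")
--     in_table = False
--     table_lines = []
--     for line in lines:
--         if "route to" in line.lower() or "routes to" in line.lower():
--             in_table = True
--         if in_table:
--             table_lines.append(line)
--             if line.strip() == "" and len(table_lines) > 3:
--                 break
--     return "\n".join(table_lines)
-- ===== SOURCE B (Python) =====
-- def extract_routing_section(prompt: str) -> str: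
--     """Extract the routing table section from the Conductor prompt."""
--     low = prompt.lower()
--     hits = [q for q in (low.find("route to"), low.find("routes to")) if q != -1]
--     if not hits:
--         return ""
--     sol = prompt.rfind("\n", 0, min(hits)) + 1
--     pos = sol
--     for _ in range(3):
--         nl = prompt.find("\n", pos)
--         if nl == -1:
--             return prompt[sol:]
--         pos = nl + 1
--     while True:
--         nl = prompt.find("\n", pos)
--         if nl == -1:
--             return prompt[sol:]
--         if prompt[pos:nl].strip() == "":
--             return prompt[sol:nl]
--         pos = nl + 1
-- ===== Notes on version B (the rewrite author's own statement) =====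
-- stated objective: alternative
-- what changed: B never builds a line list: it searches the lowered raw text for the earliest marker occurrence, backs up with rfind to the start of that line, skips three newlines by character offset, scans newline-to-newline for a whitespace-only stretch, and returns a single character slice of the prompt, whereas A splits into lines and runs a stateful flag/accumulator loop.
import Mathlib
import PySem

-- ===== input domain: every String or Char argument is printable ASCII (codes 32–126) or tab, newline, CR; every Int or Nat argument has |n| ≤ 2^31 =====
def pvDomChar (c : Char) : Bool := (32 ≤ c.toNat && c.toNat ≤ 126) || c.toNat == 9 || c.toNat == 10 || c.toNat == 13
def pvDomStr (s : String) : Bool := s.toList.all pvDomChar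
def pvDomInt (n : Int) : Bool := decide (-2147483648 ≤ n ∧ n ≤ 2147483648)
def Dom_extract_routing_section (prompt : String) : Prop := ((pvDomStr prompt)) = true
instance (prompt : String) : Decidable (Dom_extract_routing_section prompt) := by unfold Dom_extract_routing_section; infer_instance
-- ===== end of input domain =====

-- B works on raw character offsets (lowered-text search, rfind to the line start, newline-to-newline
-- scan, one slice of the input) instead of A's line-list loop (objective: alternative); same value on
-- all inputs.

-- ===== PORT A =====
def pvMarker (l : String) : Bool :=
  PySem.Str.isIn "route to" (PySem.Str.lower l) || PySem.Str.isIn "routes to" (PySem.Str.lower l)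

def pvBlank (l : String) : Bool := PySem.Str.strip l == ""

-- the for-loop with its (in_table, table_lines) state and break
def ersLoopA : List String → Bool → List String → List String
  | [], _, acc => acc
  | l :: rest, inT, acc =>
    let inT' := if pvMarker l then true else inT
    if inT' then
      let acc' := acc ++ [l]
      if pvBlank l && decide (3 < acc'.length) then acc'
      else ersLoopA rest inT' acc'
    else ersLoopA rest inT' acc

def extract_routing_section (prompt : String) : String :=
  PySem.Str.join "\n" (ersLoopA ((PySem.Str.split? prompt "\n").getD []) false [])

-- ===== PORT B =====
-- Source B's `while True` scan from newline to newline; pos strictly increases, so fuel cs.length + 1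
-- (passed at the call site) is enough and the fuel-0 branch is unreachable.
def ersW (cs : List Char) (sol : Nat) : (fuel pos : Nat) → List Char
  | 0, _ => PySem.Chars.slice cs (some (sol : Int)) none
  | fuel+1, pos =>
    let nlp := PySem.Chars.findFrom cs ['\n'] (pos : Int) none
    if nlp = -1 then PySem.Chars.slice cs (some (sol : Int)) none
    else if PySem.Chars.strip (PySem.Chars.slice cs (some (pos : Int)) (some nlp)) == [] then
      PySem.Chars.slice cs (some (sol : Int)) (some nlp)
    else ersW cs sol fuel (nlp.toNat + 1)

-- Source B's `for _ in range(3)` newline-skipping loop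
def ersB3 (cs : List Char) (sol : Nat) : (k pos : Nat) → List Char
  | 0, pos => ersW cs sol (cs.length + 1) pos
  | k+1, pos =>
    let nlp := PySem.Chars.findFrom cs ['\n'] (pos : Int) none
    if nlp = -1 then PySem.Chars.slice cs (some (sol : Int)) none
    else ersB3 cs sol k (nlp.toNat + 1)

-- body of Source B over the code-point list (PySem.Chars is the documented exact carrier for str ops)
def ersBchar (cs : List Char) : List Char :=
  let low := PySem.Chars.lower cs
  let hits := [PySem.Chars.find low "route to".toList,
               PySem.Chars.find low "routes to".toList].filter (fun q => q != -1)
  match PySem.List.min? hits (fun q => q) with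
  | none => []
  | some p =>
    let sol := (PySem.Chars.rfindFrom cs ['\n'] 0 (some p) + 1).toNat
    ersB3 cs sol 3 sol

def extract_routing_section_alt (prompt : String) : String :=
  String.ofList (ersBchar prompt.toList)

-- ===== PRECONDITION & SPEC =====
def Spec_extract_routing_section (prompt : String) (out : String) : Prop := out = extract_routing_section_alt prompt
instance (prompt : String) (out : String) : Decidable (Spec_extract_routing_section prompt out) := by unfold Spec_extract_routing_section; infer_instance

-- ===== CLAIM (what is proved, stated in full; the proofs are below) =====
def Claim_equal_extract_routing_section : Prop := ∀ (prompt : String), Dom_extract_routing_section prompt → Spec_extract_routing_section prompt (extract_routing_section prompt)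

-- ===== LEMMAS AND PROOFS =====

-- char-level versions of the two line predicates
def markerC (l : List Char) : Bool :=
  PySem.Chars.isIn "route to".toList (PySem.Chars.lower l) ||
  PySem.Chars.isIn "routes to".toList (PySem.Chars.lower l)

def blankC (l : List Char) : Bool := PySem.Chars.strip l == []

-- join a line list with '\n' (what "\n".join computes)
def joinNL : List (List Char) → List Char
  | [] => []
  | [l] => l
  | l :: m :: ls => l ++ '\n' :: joinNL (m :: ls)

-- the line list s.split("\n") produces, as a plain structural recursion
def pvLines : List Char → List (List Char)
  | [] => [[]]
  | c :: r => if c = '\n' then [] :: pvLines r else ((c :: (pvLines r).headI) :: (pvLines r).tail)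

-- character offset of the start of line i
def offL : List (List Char) → Nat → Nat
  | _, 0 => 0
  | [], _+1 => 0
  | l :: r, i+1 => l.length + 1 + offL r i

-- what the while loop contributes: lines up to and including the first blank one
def wRes (ls : List (List Char)) : List Char :=
  match ls.findIdx? blankC with
  | some j => joinNL (ls.take (j+1))
  | none => joinNL ls

-- the section as a function of the lines from the marker line on
def lineResult (ls : List (List Char)) : List Char :=
  joinNL (ls.take ((match (ls.drop 3).findIdx? blankC with
    | some j => 3 + j
    | none => ls.length - 1) + 1))

theorem headI_cons_tail {α : Type} [Inhabited α] (l : List α) (h : l ≠ []) : l.headI :: l.tail = l := by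
  cases l with
  | nil => exact absurd rfl h
  | cons a t => rfl

theorem joinNL_cons (l : List Char) (rest : List (List Char)) :
    joinNL (l :: rest) = l ++ (if rest.isEmpty then [] else '\n' :: joinNL rest) := by
  cases rest <;> simp [joinNL]

theorem joinNL_cons_ne (l : List Char) {rest : List (List Char)} (h : rest ≠ []) :
    joinNL (l :: rest) = l ++ '\n' :: joinNL rest := by
  cases rest with
  | nil => exact absurd rfl h
  | cons m ls => rfl

theorem intercalate_eq_joinNL : ∀ ls : List (List Char), ['\n'].intercalate ls = joinNL ls := by
  intro ls
  induction ls with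
  | nil => rfl
  | cons l rest ih =>
    cases rest with
    | nil => simp [joinNL, List.intercalate]
    | cons m ls' =>
      rw [joinNL_cons_ne _ (by simp), ← ih]
      simp [List.intercalate]

theorem pvLines_ne_nil (cs : List Char) : pvLines cs ≠ [] := by
  cases cs with
  | nil => simp [pvLines]
  | cons c r =>
    simp only [pvLines]
    split <;> simp

theorem joinNL_pvLines : ∀ cs : List Char, joinNL (pvLines cs) = cs := by
  intro cs
  induction cs with
  | nil => rfl
  | cons c r ih =>
    simp only [pvLines]
    by_cases h : c = '\n'
    · rw [if_pos h, joinNL_cons_ne _ (pvLines_ne_nil r), ih, h]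
      rfl
    · rw [if_neg h]
      rcases hl : pvLines r with _ | ⟨a, t⟩
      · exact absurd hl (pvLines_ne_nil r)
      · rw [hl] at ih
        cases t with
        | nil => simp [joinNL] at ih ⊢; simpa [ih]
        | cons b t' =>
          rw [joinNL_cons_ne _ (by simp)] at ih ⊢
          simp at ih ⊢
          simpa [ih]

theorem nlfree_pvLines : ∀ cs : List Char, ∀ l ∈ pvLines cs, '\n' ∉ l := by
  intro cs
  induction cs with
  | nil => simp [pvLines]
  | cons c r ih =>
    intro l hl
    simp only [pvLines] at hl
    by_cases h : c = '\n'
    · rw [if_pos h] at hl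
      rcases List.mem_cons.mp hl with h1 | h1
      · simp [h1]
      · exact ih l h1
    · rw [if_neg h] at hl
      rcases List.mem_cons.mp hl with h1 | h1
      · subst h1
        intro hm
        rcases List.mem_cons.mp hm with hm | hm
        · exact h hm.symm
        · have := ih (pvLines r).headI ?_ hm
          · exact this
          · rw [← headI_cons_tail (pvLines r) (pvLines_ne_nil r)]
            exact List.mem_cons_self
      · exact ih l (by rw [← headI_cons_tail (pvLines r) (pvLines_ne_nil r)]; right; exact h1)

theorem splitOn_go_eq : ∀ (fuel : Nat) (l cur : List Char) (acc : List (List Char)),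
    l.length < fuel →
    PySem.Chars.splitOn.go ['\n'] fuel l cur acc
      = acc.reverse ++ ((cur.reverse ++ (pvLines l).headI) :: (pvLines l).tail) := by
  intro fuel
  induction fuel with
  | zero => intro l cur acc h; omega
  | succ fuel ih =>
    intro l cur acc h
    cases l with
    | nil => simp [PySem.Chars.splitOn.go, pvLines]
    | cons c rest =>
      simp only [PySem.Chars.splitOn.go]
      by_cases hc : c = '\n'
      · rw [if_pos (by simp [List.isPrefixOf, hc])]
        rw [ih _ _ _ (by simpa using Nat.lt_of_succ_lt_succ h)]
        simp [pvLines, hc, headI_cons_tail (pvLines rest) (pvLines_ne_nil rest)]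
      · rw [if_neg (by simp [List.isPrefixOf]; exact fun hh => hc hh.symm)]
        rw [ih _ _ _ (by simpa using Nat.lt_of_succ_lt_succ h)]
        simp [pvLines, hc]

theorem splitOn_eq_pvLines (cs : List Char) : PySem.Chars.splitOn cs ['\n'] = pvLines cs := by
  unfold PySem.Chars.splitOn
  rw [splitOn_go_eq (cs.length + 1) cs [] [] (by omega)]
  rcases hl : pvLines cs with _ | ⟨a, t⟩
  · exact absurd hl (pvLines_ne_nil cs)
  · simp

theorem lines_count_le : ∀ ls : List (List Char), ls.length ≤ (joinNL ls).length + 1 := by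
  intro ls
  induction ls with
  | nil => simp
  | cons l rest ih =>
    cases rest with
    | nil => simp [joinNL]
    | cons m t =>
      rw [joinNL_cons_ne _ (by simp)]
      simp only [List.length_cons, List.length_append]
      simp at ih ⊢
      omega


-- ---- find / rfind machinery ----

theorem go_shift (M : List Char) : ∀ (l : List Char) (k : Nat),
    PySem.Chars.find.go M l k
      = if PySem.Chars.find l M = -1 then -1 else PySem.Chars.find l M + k := by
  intro l
  induction l with
  | nil =>
    intro k
    by_cases h : M.isEmpty <;> simp [PySem.Chars.find.go, PySem.Chars.find, h]
  | cons c t ih =>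
    intro k
    by_cases h : M.isPrefixOf (c :: t)
    · simp [PySem.Chars.find.go, PySem.Chars.find, h]
    · simp only [PySem.Chars.find.go, PySem.Chars.find, h, Bool.false_eq_true, if_false]
      rw [ih (k+1), ih 1]
      have hb := PySem.Chars.neg_one_le_find (s := t) (sub := M)
      by_cases h2 : PySem.Chars.find t M = -1
      · simp [h2]
      · rw [if_neg h2, if_neg (by omega), if_neg h2]
        push_cast
        omega

theorem find_cons (M : List Char) (c : Char) (t : List Char) :
    PySem.Chars.find (c :: t) M
      = if M.isPrefixOf (c :: t) then 0
        else if PySem.Chars.find t M = -1 then -1 else PySem.Chars.find t M + 1 := by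
  by_cases h : M.isPrefixOf (c :: t)
  · simp [PySem.Chars.find, PySem.Chars.find.go, h]
  · simp only [PySem.Chars.find, PySem.Chars.find.go, h, Bool.false_eq_true, if_false]
    simpa using go_shift M t 1

theorem find_nil_ne (M : List Char) (hM : M ≠ []) : PySem.Chars.find [] M = -1 := by
  simp [PySem.Chars.find, PySem.Chars.find.go, List.isEmpty_iff, hM]

theorem prefix_nl {M : List Char} (hnlM : '\n' ∉ M) (x y : List Char) :
    M <+: x ++ '\n' :: y ↔ M <+: x := by
  constructor
  · intro h
    by_cases hle : M.length ≤ x.length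
    · have he := List.prefix_iff_eq_take.mp h
      rw [List.take_append_of_le_length hle] at he
      exact he ▸ List.take_prefix _ _
    · exfalso
      apply hnlM
      have hx : x.length < M.length := by omega
      have hg := h.getElem (i := x.length) hx
      rw [List.getElem_append_right (le_refl x.length)] at hg
      simp at hg
      rw [← hg]
      exact List.getElem_mem _
  · intro h
    exact h.trans (List.prefix_append x ('\n' :: y))

theorem find_append_nl {M : List Char} (hM : M ≠ []) (hnlM : '\n' ∉ M) :
    ∀ (a b : List Char),
    PySem.Chars.find (a ++ '\n' :: b) M
      = if PySem.Chars.find a M = -1 then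
          (if PySem.Chars.find b M = -1 then -1 else (a.length : Int) + 1 + PySem.Chars.find b M)
        else PySem.Chars.find a M := by
  intro a
  induction a with
  | nil =>
    intro b
    have hpre : ¬ M.isPrefixOf ('\n' :: b) = true := by
      cases M with
      | nil => exact absurd rfl hM
      | cons m mt =>
        simp only [List.isPrefixOf_cons₂, Bool.and_eq_true, beq_iff_eq]
        rintro ⟨hm, -⟩
        exact hnlM (List.mem_cons.mpr (Or.inl hm.symm))
    rw [List.nil_append, find_cons, if_neg hpre, if_pos (find_nil_ne M hM)]
    have hb := PySem.Chars.neg_one_le_find (s := b) (sub := M)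
    simp only [List.length_nil]
    split_ifs <;> omega
  | cons c a' ih =>
    intro b
    have hpiff : M.isPrefixOf ((c :: a') ++ '\n' :: b) = M.isPrefixOf (c :: a') := by
      have hiff : (M <+: (c :: a') ++ '\n' :: b) ↔ (M <+: (c :: a')) := prefix_nl hnlM _ _
      rw [← List.isPrefixOf_iff_prefix, ← List.isPrefixOf_iff_prefix] at hiff
      exact Bool.eq_iff_iff.mpr hiff
    rw [show (c :: a') ++ '\n' :: b = c :: (a' ++ '\n' :: b) from rfl, find_cons,
      show c :: (a' ++ '\n' :: b) = (c :: a') ++ '\n' :: b from rfl, hpiff,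
      find_cons (M := M) (c := c) (t := a')]
    by_cases hp : M.isPrefixOf (c :: a')
    · simp [hp]
    · simp only [hp, Bool.false_eq_true, if_false]
      rw [ih b]
      have hb := PySem.Chars.neg_one_le_find (s := b) (sub := M)
      have ha := PySem.Chars.neg_one_le_find (s := a') (sub := M)
      simp only [List.length_cons]
      split_ifs <;> omega

theorem find_bound {l M : List Char} (h : PySem.Chars.find l M ≠ -1) :
    0 ≤ PySem.Chars.find l M ∧ (PySem.Chars.find l M).toNat + M.length ≤ l.length := by
  have h0 : 0 ≤ PySem.Chars.find l M := by
    have := PySem.Chars.neg_one_le_find (s := l) (sub := M)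
    omega
  have hsp := (PySem.Chars.find_spec (s := l) (sub := M) h0).1
  have hlen := hsp.length_le
  have hle : PySem.Chars.find l M ≤ l.length := PySem.Chars.find_le_length l M
  rw [List.length_drop] at hlen
  exact ⟨h0, by omega⟩

theorem find_nl_none {l : List Char} (h : '\n' ∉ l) : PySem.Chars.find l ['\n'] = -1 := by
  rw [PySem.Chars.find_eq_neg_one_iff]
  intro hinf
  exact h ((List.singleton_infix_iff '\n' l).mp hinf)

theorem go_nl_append {l : List Char} (h : '\n' ∉ l) :
    ∀ (r : List Char) (k : Nat),
    PySem.Chars.find.go ['\n'] (l ++ '\n' :: r) k = ((k + l.length : Nat) : Int) := by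
  induction l with
  | nil => intro r k; simp [PySem.Chars.find.go, List.isPrefixOf_cons₂]
  | cons c t ih =>
    intro r k
    have hc : ¬ (['\n'].isPrefixOf (c :: (t ++ '\n' :: r))) = true := by
      simp only [List.isPrefixOf_cons₂, Bool.and_eq_true, beq_iff_eq]
      rintro ⟨hm, -⟩
      exact h (List.mem_cons.mpr (Or.inl hm))
    simp only [List.cons_append, PySem.Chars.find.go, hc, Bool.false_eq_true, if_false]
    rw [ih (fun hm => h (List.mem_cons.mpr (Or.inr hm))) r (k+1)]
    congr 1
    simp
    omega

theorem find_nl_append {l : List Char} (h : '\n' ∉ l) (r : List Char) :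
    PySem.Chars.find (l ++ '\n' :: r) ['\n'] = (l.length : Int) := by
  have hg := go_nl_append h r 0
  simpa [PySem.Chars.find] using hg

-- rfind

theorem rfind_go_none {t : List Char} (h : '\n' ∉ t) :
    ∀ j : Nat, PySem.Chars.rfind.go t ['\n'] j = -1 := by
  intro j
  induction j with
  | zero =>
    have hpre : ¬ (['\n'].isPrefixOf t) = true := by
      cases t with
      | nil => simp [List.isPrefixOf]
      | cons c r =>
        simp only [List.isPrefixOf_cons₂, Bool.and_eq_true, beq_iff_eq]
        rintro ⟨hm, -⟩
        exact h (List.mem_cons.mpr (Or.inl hm))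
    simp [PySem.Chars.rfind.go, hpre]
  | succ j ih =>
    have hpre : ¬ (['\n'].isPrefixOf (t.drop (j+1))) = true := by
      cases hd : t.drop (j+1) with
      | nil => simp [List.isPrefixOf]
      | cons c r =>
        simp only [List.isPrefixOf_cons₂, Bool.and_eq_true, beq_iff_eq]
        rintro ⟨hm, -⟩
        apply h
        have hcm : c ∈ t.drop (j+1) := by rw [hd]; simp
        rw [hm]
        exact List.mem_of_mem_drop hcm
    simp [PySem.Chars.rfind.go, hpre, ih]

theorem rfind_go_append {a b : List Char} (h : '\n' ∉ b) :
    ∀ k : Nat, PySem.Chars.rfind.go (a ++ '\n' :: b) ['\n'] (a.length + k) = (a.length : Int) := by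
  intro k
  induction k with
  | zero =>
    cases a with
    | nil => simp [PySem.Chars.rfind.go, List.isPrefixOf_cons₂]
    | cons c a' =>
      have hj : (c :: a').length + 0 = a'.length + 1 := by simp
      rw [hj]
      have hd : ((c :: a') ++ '\n' :: b).drop (a'.length + 1) = '\n' :: b := by
        rw [show (c :: a') ++ '\n' :: b = c :: (a' ++ '\n' :: b) from rfl,
          List.drop_succ_cons, List.drop_left]
      simp only [PySem.Chars.rfind.go, hd]
      simp [List.isPrefixOf_cons₂]
  | succ k ih =>
    have hdrop : (a ++ '\n' :: b).drop (a.length + (k + 1)) = b.drop k := by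
      rw [List.drop_length_add_append, List.drop_succ_cons]
    have hpre : ¬ (['\n'].isPrefixOf ((a ++ '\n' :: b).drop (a.length + (k+1)))) = true := by
      rw [hdrop]
      cases hd : b.drop k with
      | nil => simp [List.isPrefixOf]
      | cons c r =>
        simp only [List.isPrefixOf_cons₂, Bool.and_eq_true, beq_iff_eq]
        rintro ⟨hm, -⟩
        apply h
        have hcm : c ∈ b.drop k := by rw [hd]; simp
        rw [hm]
        exact List.mem_of_mem_drop hcm
    rw [show a.length + (k+1) = (a.length + k) + 1 from rfl]
    simp only [PySem.Chars.rfind.go]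
    rw [if_neg (by rw [show a.length + k + 1 = a.length + (k+1) from rfl]; exact_mod_cast hpre)]
    exact ih

theorem rfind_nl_append {a b : List Char} (h : '\n' ∉ b) :
    PySem.Chars.rfind (a ++ '\n' :: b) ['\n'] = (a.length : Int) := by
  unfold PySem.Chars.rfind
  rw [show (a ++ '\n' :: b).length = a.length + (1 + b.length) from by simp; omega]
  exact rfind_go_append h (1 + b.length)

theorem rfind_no_nl {t : List Char} (h : '\n' ∉ t) : PySem.Chars.rfind t ['\n'] = -1 := by
  unfold PySem.Chars.rfind
  exact rfind_go_none h t.length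


-- ---- line-offset structure ----

theorem findIdx?_lt_length {p : List Char → Bool} {l : List (List Char)} {i : Nat}
    (h : List.findIdx? p l = some i) : i < l.length := by
  have := List.findIdx?_eq_some_iff_findIdx_eq.mp h
  omega

theorem split_at_off : ∀ (lls : List (List Char)) (st : Nat), st < lls.length →
    ∃ pre, joinNL lls = pre ++ joinNL (lls.drop st) ∧ pre.length = offL lls st ∧
      (st = 0 → pre = []) ∧ (0 < st → ∃ pre0, pre = pre0 ++ ['\n']) := by
  intro lls
  induction lls with
  | nil => intro st h; simp at h
  | cons l r ih =>
    intro st h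
    cases st with
    | zero => exact ⟨[], by simp [offL]⟩
    | succ st' =>
      have hr : st' < r.length := by simpa using h
      have hrne : r ≠ [] := by
        cases r with
        | nil => simp at hr
        | cons _ _ => simp
      obtain ⟨pre', h1, h2, h3, h4⟩ := ih st' hr
      refine ⟨l ++ '\n' :: pre', ?_, ?_, ?_, ?_⟩
      · rw [joinNL_cons_ne _ hrne, h1]
        simp
      · simp [offL, h2]
        omega
      · intro hc; omega
      · intro _
        cases st' with
        | zero =>
          rw [h3 rfl]
          exact ⟨l, by simp⟩
        | succ s2 =>
          obtain ⟨pre0, hp0⟩ := h4 (by omega)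
          exact ⟨l ++ '\n' :: pre0, by simp [hp0]⟩

theorem offL_mono : ∀ (lls : List (List Char)) (a b : Nat), a < b → b ≤ lls.length →
    offL lls a + (lls.getD a []).length + 1 ≤ offL lls b := by
  intro lls
  induction lls with
  | nil => intro a b h1 h2; simp at h2; omega
  | cons l r ih =>
    intro a b h1 h2
    cases b with
    | zero => omega
    | succ b' =>
      cases a with
      | zero =>
        simp only [offL, List.getD_cons_zero]
        have : 0 ≤ offL r b' := by positivity
        omega
      | succ a' =>
        simp only [offL, List.getD_cons_succ]
        have := ih a' b' (by omega) (by simpa using h2)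
        omega

theorem offL_add_len_le {lls : List (List Char)} {st : Nat} (h : st < lls.length) :
    offL lls st + (lls.getD st []).length ≤ (joinNL lls).length := by
  obtain ⟨pre, h1, h2, -, -⟩ := split_at_off lls st h
  have hd : lls.drop st = lls.getD st [] :: lls.drop (st + 1) := by
    rw [List.getD_eq_getElem lls [] h]
    exact List.drop_eq_getElem_cons h
  have hlen : (lls.getD st []).length ≤ (joinNL (lls.drop st)).length := by
    rw [hd, joinNL_cons]
    simp
  have : (joinNL lls).length = pre.length + (joinNL (lls.drop st)).length := by
    rw [h1]; simp
  omega

theorem rfindFrom_zero_nat (s sub : List Char) (p : Nat) (hp : p ≤ s.length) :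
    PySem.Chars.rfindFrom s sub 0 (some (p:Int)) =
      (if PySem.Chars.rfind (s.take p) sub = -1 then -1 else PySem.Chars.rfind (s.take p) sub) := by
  have hA : ¬((s.length:Int) < (p:Int)) := by exact_mod_cast not_lt.mpr hp
  have hB : ¬((p:Int) < 0) := by omega
  simp only [PySem.Chars.rfindFrom, hA, hB, if_false]
  simp

theorem rfind_line_start {lls : List (List Char)} (hnl : ∀ l ∈ lls, '\n' ∉ l)
    {st p : Nat} (hst : st < lls.length)
    (h1 : offL lls st ≤ p) (h2 : p ≤ offL lls st + (lls.getD st []).length) :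
    PySem.Chars.rfindFrom (joinNL lls) ['\n'] 0 (some (p : Int)) = (offL lls st : Int) - 1 := by
  have hple : p ≤ (joinNL lls).length := le_trans h2 (offL_add_len_le hst)
  obtain ⟨pre, hsplit, hlen, hz, hpos⟩ := split_at_off lls st hst
  have hgd : lls.getD st [] = lls[st] := List.getD_eq_getElem lls [] hst
  have hd : lls.drop st = lls.getD st [] :: lls.drop (st + 1) := by
    rw [hgd]
    exact List.drop_eq_getElem_cons hst
  -- the searched region take p (joinNL lls)
  have htake : (joinNL lls).take p = pre ++ (lls.getD st []).take (p - offL lls st) := by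
    rw [hsplit, List.take_append, List.take_of_length_le (by omega), hd, joinNL_cons,
      List.take_append_of_le_length (by omega), hlen]
  have hwnl : '\n' ∉ (lls.getD st []).take (p - offL lls st) := fun hm =>
    hnl _ (by rw [hgd]; exact List.getElem_mem hst) (List.mem_of_mem_take hm)
  rw [rfindFrom_zero_nat _ _ _ hple, htake]
  rcases Nat.eq_zero_or_pos st with hst0 | hstpos
  · subst hst0
    rw [hz rfl, List.nil_append, if_pos (rfind_no_nl hwnl)]
    have hoff : offL lls 0 = 0 := by cases lls <;> rfl
    rw [hoff]
    norm_num
  · obtain ⟨pre0, hpre0⟩ := hpos hstpos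
    rw [hpre0, show (pre0 ++ ['\n']) ++ (lls.getD st []).take (p - offL lls st)
        = pre0 ++ '\n' :: ((lls.getD st []).take (p - offL lls st)) from by simp,
      rfind_nl_append hwnl, if_neg (by omega)]
    have hpl : pre0.length + 1 = offL lls st := by
      rw [hpre0] at hlen
      simpa using hlen
    omega


theorem fi_join {M : List Char} (hM : M ≠ []) (hnlM : '\n' ∉ M) :
    ∀ lls : List (List Char), (∀ l ∈ lls, '\n' ∉ l) →
    (lls.findIdx? (fun l => PySem.Chars.isIn M l) = none → PySem.Chars.find (joinNL lls) M = -1) ∧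
    (∀ i, lls.findIdx? (fun l => PySem.Chars.isIn M l) = some i →
       ∃ f : Nat, PySem.Chars.find (joinNL lls) M = ((offL lls i + f : Nat) : Int) ∧
         f + M.length ≤ (lls.getD i []).length) := by
  intro lls
  induction lls with
  | nil =>
    intro _
    constructor
    · intro _
      simpa [joinNL] using find_nil_ne M hM
    · intro i hi
      simp [List.findIdx?, List.findIdx?.go] at hi
  | cons l rest ih =>
    intro hnl
    have hnlr : ∀ x ∈ rest, '\n' ∉ x := fun x hx => hnl x (List.mem_cons.mpr (Or.inr hx))
    by_cases hin : PySem.Chars.isIn M l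
    · have hfi : (l :: rest).findIdx? (fun x => PySem.Chars.isIn M x) = some 0 := by
        simp [List.findIdx?_cons, hin]
      constructor
      · intro h
        rw [hfi] at h
        simp at h
      · intro i hi
        rw [hfi] at hi
        injection hi with hi
        subst hi
        have hne : PySem.Chars.find l M ≠ -1 := by
          simpa [PySem.Chars.isIn] using hin
        obtain ⟨h0, hb⟩ := find_bound hne
        refine ⟨(PySem.Chars.find l M).toNat, ?_, by simpa using hb⟩
        cases rest with
        | nil =>
          have hoff : offL [l] 0 = 0 := rfl
          simp [joinNL, hoff]
          omega
        | cons m t =>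
          rw [joinNL_cons_ne _ (by simp), find_append_nl hM hnlM, if_neg hne]
          have hoff : offL (l :: m :: t) 0 = 0 := rfl
          rw [hoff]
          omega
    · have hnin : PySem.Chars.find l M = -1 := by
        simpa [PySem.Chars.isIn] using hin
      have hfi : (l :: rest).findIdx? (fun x => PySem.Chars.isIn M x)
          = (rest.findIdx? (fun x => PySem.Chars.isIn M x)).map (· + 1) := by
        simp [List.findIdx?_cons, hin]
      obtain ⟨ihn, ihs⟩ := ih hnlr
      constructor
      · intro h
        rw [hfi] at h
        have hnone : rest.findIdx? (fun x => PySem.Chars.isIn M x) = none := by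
          cases hr : rest.findIdx? (fun x => PySem.Chars.isIn M x) with
          | none => rfl
          | some j => rw [hr] at h; simp at h
        cases rest with
        | nil => simpa [joinNL] using hnin
        | cons m t =>
          rw [joinNL_cons_ne _ (by simp), find_append_nl hM hnlM, if_pos hnin,
            if_pos (ihn hnone)]
      · intro i hi
        rw [hfi] at hi
        cases hr : rest.findIdx? (fun x => PySem.Chars.isIn M x) with
        | none => rw [hr] at hi; simp at hi
        | some j =>
          rw [hr] at hi
          simp at hi
          subst hi
          obtain ⟨f, hv, hbd⟩ := ihs j hr
          have hrne : rest ≠ [] := by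
            rintro rfl
            simp [List.findIdx?, List.findIdx?.go] at hr
          refine ⟨f, ?_, by simpa using hbd⟩
          rw [joinNL_cons_ne _ hrne, find_append_nl hM hnlM, if_pos hnin,
            if_neg (by rw [hv]; omega), hv]
          have hoff : offL (l :: rest) (j + 1) = l.length + 1 + offL rest j := rfl
          rw [hoff]
          push_cast
          omega


-- ---- the two loops, at the line level ----

theorem findFrom_boundary (pre l : List Char) (rest : List (List Char)) (hl : '\n' ∉ l) :
    PySem.Chars.findFrom (pre ++ joinNL (l :: rest)) ['\n'] ((pre.length : Nat) : Int) none
      = if rest.isEmpty then -1 else ((pre.length + l.length : Nat) : Int) := by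
  have hk : pre.length ≤ (pre ++ joinNL (l :: rest)).length := by simp
  rw [PySem.Chars.findFrom_natCast _ _ _ hk, List.drop_left]
  cases rest with
  | nil => simp [joinNL, find_nl_none hl]
  | cons m t =>
    rw [joinNL_cons_ne _ (by simp), find_nl_append hl, if_neg (by omega)]
    simp

theorem slice_sol (pre X : List Char) :
    PySem.Chars.slice (pre ++ X) (some ((pre.length : Nat) : Int)) none = X := by
  simp [PySem.List.slice_from_natCast]

theorem slice_line (pre l Y : List Char) :
    PySem.Chars.slice (pre ++ (l ++ Y)) (some ((pre.length : Nat) : Int))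
      (some ((pre.length + l.length : Nat) : Int)) = l := by
  simp only [PySem.Chars.slice_eq_listSlice, PySem.List.slice_natCast, List.drop_left]
  rw [show pre.length + l.length - pre.length = l.length from by omega]
  exact List.take_left ..

theorem slice_mid (pre mid l Y : List Char) :
    PySem.Chars.slice (pre ++ (mid ++ (l ++ Y))) (some ((pre.length : Nat) : Int))
      (some ((pre.length + mid.length + l.length : Nat) : Int)) = mid ++ l := by
  simp only [PySem.Chars.slice_eq_listSlice, PySem.List.slice_natCast, List.drop_left]
  rw [show pre.length + mid.length + l.length - pre.length = mid.length + l.length from by omega,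
    List.take_append, List.take_of_length_le (by omega),
    show mid.length + l.length - mid.length = l.length from by omega,
    List.take_append_of_le_length le_rfl, List.take_length]

theorem wRes_single (l : List Char) : wRes [l] = l := by
  by_cases h : blankC l <;> simp [wRes, List.findIdx?_cons, h, joinNL]

theorem ersW_thm : ∀ (ls : List (List Char)) (fuel : Nat) (pre mid : List Char),
    ls ≠ [] → (∀ l ∈ ls, '\n' ∉ l) → ls.length ≤ fuel →
    ersW (pre ++ (mid ++ joinNL ls)) pre.length fuel (pre.length + mid.length)
      = mid ++ wRes ls := by
  intro ls
  induction ls with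
  | nil => intro fuel pre mid h _ _; exact absurd rfl h
  | cons l rest ih =>
    intro fuel pre mid _ hnl hfuel
    cases fuel with
    | zero => simp at hfuel
    | succ f =>
      have hnll : '\n' ∉ l := hnl l List.mem_cons_self
      have hnlr : ∀ x ∈ rest, '\n' ∉ x := fun x hx => hnl x (List.mem_cons.mpr (Or.inr hx))
      have hff : PySem.Chars.findFrom (pre ++ (mid ++ joinNL (l :: rest))) ['\n']
          ((pre.length + mid.length : Nat) : Int) none
          = if rest.isEmpty then -1 else (((pre ++ mid).length + l.length : Nat) : Int) := by
        rw [show pre ++ (mid ++ joinNL (l :: rest)) = (pre ++ mid) ++ joinNL (l :: rest) from by simp,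
          show ((pre.length + mid.length : Nat) : Int) = (((pre ++ mid).length : Nat) : Int) from by simp]
        exact findFrom_boundary (pre ++ mid) l rest hnll
      cases rest with
      | nil =>
        simp only [ersW, hff, List.isEmpty_nil, if_pos rfl, if_true, reduceIte]
        rw [show mid ++ joinNL [l] = mid ++ l from by simp [joinNL], slice_sol, wRes_single]
      | cons m t =>
        have hrne : (m :: t : List (List Char)) ≠ [] := by simp
        have hY : mid ++ joinNL (l :: m :: t) = mid ++ (l ++ ('\n' :: joinNL (m :: t))) := by
          rw [joinNL_cons_ne _ hrne]
        simp only [ersW, hff, List.isEmpty_cons, if_false, Bool.false_eq_true, reduceIte]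
        rw [if_neg (by omega)]
        have hline : PySem.Chars.slice (pre ++ (mid ++ joinNL (l :: m :: t)))
            (some ((pre.length + mid.length : Nat) : Int))
            (some (((pre ++ mid).length + l.length : Nat) : Int)) = l := by
          rw [hY, show pre ++ (mid ++ (l ++ ('\n' :: joinNL (m :: t))))
              = (pre ++ mid) ++ (l ++ ('\n' :: joinNL (m :: t))) from by simp,
            show ((pre.length + mid.length : Nat) : Int) = (((pre ++ mid).length : Nat) : Int) from by simp]
          exact slice_line (pre ++ mid) l _
        rw [hline]
        by_cases hbl : blankC l
        · rw [if_pos (by simpa [blankC] using hbl)]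
          have : PySem.Chars.slice (pre ++ (mid ++ joinNL (l :: m :: t)))
              (some ((pre.length : Nat) : Int))
              (some (((pre ++ mid).length + l.length : Nat) : Int)) = mid ++ l := by
            rw [hY, show ((pre ++ mid).length + l.length : Nat) = pre.length + mid.length + l.length from by simp]
            exact slice_mid pre mid l _
          rw [this]
          have hfi : (l :: m :: t).findIdx? blankC = some 0 := by
            simp [List.findIdx?_cons, hbl]
          simp [wRes, hfi, joinNL]
        · rw [if_neg (by simpa [blankC] using hbl)]
          have htn : ((((pre ++ mid).length + l.length : Nat) : Int)).toNat + 1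
              = pre.length + (mid ++ (l ++ ['\n'])).length := by
            simp
            omega
          rw [htn]
          have hcs : pre ++ (mid ++ joinNL (l :: m :: t))
              = pre ++ ((mid ++ (l ++ ['\n'])) ++ joinNL (m :: t)) := by
            rw [joinNL_cons_ne _ hrne]
            simp
          rw [hcs]
          rw [ih f pre (mid ++ (l ++ ['\n'])) hrne hnlr (by simp at hfuel ⊢; omega)]
          have hfir : (l :: m :: t).findIdx? blankC
              = ((m :: t).findIdx? blankC).map (· + 1) := by
            simp [List.findIdx?_cons, hbl]
          cases hr : (m :: t).findIdx? blankC with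
          | none =>
            simp only [wRes, hfir, hr, Option.map_none]
            rw [joinNL_cons_ne _ hrne]
            simp
          | some j =>
            simp only [wRes, hfir, hr, Option.map_some]
            rw [show List.take (j + 1 + 1) (l :: m :: t) = l :: (m :: List.take j t) from by
                simp [List.take_succ_cons],
              joinNL_cons_ne _ (by simp)]
            simp


theorem ersB3_step (k : Nat) (pre mid l : List Char) (rest : List (List Char)) (sol : Nat)
    (hl : '\n' ∉ l) :
    ersB3 (pre ++ (mid ++ joinNL (l :: rest))) sol (k+1) (pre.length + mid.length)
      = if rest.isEmpty then
          PySem.Chars.slice (pre ++ (mid ++ joinNL (l :: rest))) (some (sol : Int)) none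
        else ersB3 (pre ++ (mid ++ joinNL (l :: rest))) sol k
          (pre.length + (mid ++ (l ++ ['\n'])).length) := by
  have hff : PySem.Chars.findFrom (pre ++ (mid ++ joinNL (l :: rest))) ['\n']
      ((pre.length + mid.length : Nat) : Int) none
      = if rest.isEmpty then -1 else (((pre ++ mid).length + l.length : Nat) : Int) := by
    rw [show pre ++ (mid ++ joinNL (l :: rest)) = (pre ++ mid) ++ joinNL (l :: rest) from by simp,
      show ((pre.length + mid.length : Nat) : Int) = (((pre ++ mid).length : Nat) : Int) from by simp]
    exact findFrom_boundary (pre ++ mid) l rest hl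
  cases rest with
  | nil =>
    simp only [ersB3, hff, List.isEmpty_nil, reduceIte]
  | cons m t =>
    simp only [ersB3, hff, List.isEmpty_cons, Bool.false_eq_true, reduceIte]
    rw [if_neg (by omega)]
    congr 1
    simp
    omega

theorem joinNL_four (a b c : List Char) (X : List (List Char)) (hX : X ≠ []) :
    joinNL (a :: b :: c :: X) = a ++ '\n' :: (b ++ '\n' :: (c ++ '\n' :: joinNL X)) := by
  rw [joinNL_cons_ne _ (by simp), joinNL_cons_ne _ (by simp), joinNL_cons_ne _ hX]

theorem ersB3_thm : ∀ (ls : List (List Char)) (pre : List Char),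
    ls ≠ [] → (∀ l ∈ ls, '\n' ∉ l) →
    ersB3 (pre ++ joinNL ls) pre.length 3 pre.length = lineResult ls := by
  intro ls pre hne hnl
  match ls, hne with
  | [a], _ =>
    have h1 := ersB3_step 2 pre [] a [] pre.length (hnl a (by simp))
    simp only [List.nil_append, Nat.add_zero, List.length_nil] at h1
    rw [h1]
    simp only [List.isEmpty_nil, reduceIte]
    rw [slice_sol]
    simp [lineResult, List.findIdx?, List.findIdx?.go, joinNL]
  | [a, b], _ =>
    have h1 := ersB3_step 2 pre [] a [b] pre.length (hnl a (by simp))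
    simp only [List.nil_append, Nat.add_zero, List.length_nil] at h1
    rw [h1, if_neg (by simp)]
    have hre : joinNL [a, b] = (a ++ ['\n']) ++ joinNL [b] := by
      rw [joinNL_cons_ne _ (by simp)]
      simp
    rw [show pre ++ joinNL [a, b] = pre ++ ((a ++ ['\n']) ++ joinNL [b]) from by rw [hre]]
    have h2 := ersB3_step 1 pre (a ++ ['\n']) b [] pre.length (hnl b (by simp))
    rw [h2]
    simp only [List.isEmpty_nil, reduceIte]
    rw [slice_sol, ← hre]
    simp [lineResult, List.findIdx?, List.findIdx?.go, joinNL]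
  | [a, b, c], _ =>
    have h1 := ersB3_step 2 pre [] a [b, c] pre.length (hnl a (by simp))
    simp only [List.nil_append, Nat.add_zero, List.length_nil] at h1
    rw [h1, if_neg (by simp)]
    have hre : joinNL [a, b, c] = (a ++ ['\n']) ++ joinNL [b, c] := by
      rw [joinNL_cons_ne _ (by simp)]
      simp
    rw [show pre ++ joinNL [a, b, c] = pre ++ ((a ++ ['\n']) ++ joinNL [b, c]) from by rw [hre]]
    have h2 := ersB3_step 1 pre (a ++ ['\n']) b [c] pre.length (hnl b (by simp))
    rw [h2, if_neg (by simp)]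
    have hre2 : (a ++ ['\n']) ++ joinNL [b, c] = ((a ++ ['\n']) ++ (b ++ ['\n'])) ++ joinNL [c] := by
      rw [joinNL_cons_ne _ (by simp)]
      simp
    rw [show pre ++ ((a ++ ['\n']) ++ joinNL [b, c])
        = pre ++ (((a ++ ['\n']) ++ (b ++ ['\n'])) ++ joinNL [c]) from by rw [hre2]]
    have h3 := ersB3_step 0 pre ((a ++ ['\n']) ++ (b ++ ['\n'])) c [] pre.length (hnl c (by simp))
    rw [h3]
    simp only [List.isEmpty_nil, reduceIte]
    rw [slice_sol, ← hre2, ← hre]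
    simp [lineResult, List.findIdx?, List.findIdx?.go, joinNL]
  | a :: b :: c :: d :: rest, _ =>
    have hX : (d :: rest : List (List Char)) ≠ [] := by simp
    have hj4 := joinNL_four a b c (d :: rest) hX
    have hre : joinNL (a :: b :: c :: d :: rest)
        = (((a ++ ['\n']) ++ (b ++ ['\n'])) ++ (c ++ ['\n'])) ++ joinNL (d :: rest) := by
      rw [hj4]
      simp
    have h1 := ersB3_step 2 pre [] a (b :: c :: d :: rest) pre.length (hnl a (by simp))
    simp only [List.nil_append, Nat.add_zero, List.length_nil] at h1
    rw [h1, if_neg (by simp)]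
    rw [show pre ++ joinNL (a :: b :: c :: d :: rest)
        = pre ++ ((a ++ ['\n']) ++ joinNL (b :: c :: d :: rest)) from by
          rw [joinNL_cons_ne _ (by simp)]; simp]
    have h2 := ersB3_step 1 pre (a ++ ['\n']) b (c :: d :: rest) pre.length (hnl b (by simp))
    rw [h2, if_neg (by simp)]
    rw [show pre ++ ((a ++ ['\n']) ++ joinNL (b :: c :: d :: rest))
        = pre ++ (((a ++ ['\n']) ++ (b ++ ['\n'])) ++ joinNL (c :: d :: rest)) from by
          rw [joinNL_cons_ne b (by simp)]; simp]
    have h3 := ersB3_step 0 pre ((a ++ ['\n']) ++ (b ++ ['\n'])) c (d :: rest) pre.length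
      (hnl c (by simp))
    rw [h3, if_neg (by simp)]
    rw [show pre ++ (((a ++ ['\n']) ++ (b ++ ['\n'])) ++ joinNL (c :: d :: rest))
        = pre ++ ((((a ++ ['\n']) ++ (b ++ ['\n'])) ++ (c ++ ['\n'])) ++ joinNL (d :: rest)) from by
          rw [joinNL_cons_ne c (by simp)]; simp]
    simp only [ersB3]
    have hnlr : ∀ x ∈ (d :: rest), '\n' ∉ x := fun x hx =>
      hnl x (by simp at hx ⊢; tauto)
    have hfuel : (d :: rest).length
        ≤ (pre ++ ((((a ++ ['\n']) ++ (b ++ ['\n'])) ++ (c ++ ['\n'])) ++ joinNL (d :: rest))).length + 1 := by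
      have := lines_count_le (d :: rest)
      simp only [List.length_append]
      omega
    rw [ersW_thm (d :: rest) _ pre (((a ++ ['\n']) ++ (b ++ ['\n'])) ++ (c ++ ['\n'])) hX hnlr hfuel]
    -- now compare with lineResult
    unfold lineResult
    rw [show (a :: b :: c :: d :: rest).drop 3 = d :: rest from rfl]
    cases hr : (d :: rest).findIdx? blankC with
    | some j =>
      have hjlt : j < (d :: rest).length := findIdx?_lt_length hr
      have htk : (d :: rest).take (j + 1) ≠ [] := by
        simp [List.take_eq_nil_iff]
      rw [show 3 + j + 1 = (j + 1) + 3 from by omega]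
      rw [show (a :: b :: c :: d :: rest).take ((j + 1) + 3)
          = a :: b :: c :: ((d :: rest).take (j + 1)) from by simp [List.take_succ_cons]]
      rw [joinNL_four a b c _ htk]
      simp [wRes, hr]
    | none =>
      rw [show (a :: b :: c :: d :: rest).length - 1 + 1 = (a :: b :: c :: d :: rest).length from by
        simp]
      rw [List.take_of_length_le le_rfl, hj4]
      simp [wRes, hr]


-- ---- lowering, the marker search and Python's min ----

theorem lowerChar_nl : PySem.Chars.lowerChar '\n' = '\n' := by decide

theorem char_ofNat_toNat (n : Nat) (h : Nat.isValidChar n) : (Char.ofNat n).toNat = n := by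
  unfold Char.ofNat
  rw [dif_pos h]
  unfold Char.ofNatAux Char.toNat
  simp [UInt32.toNat_ofNatLT]

theorem lowerChar_ne_nl {c : Char} (h : c ≠ '\n') : PySem.Chars.lowerChar c ≠ '\n' := by
  unfold PySem.Chars.lowerChar
  by_cases hu : PySem.Chars.isupper c = true
  · rw [if_pos hu]
    simp [PySem.Chars.isupper] at hu
    intro he
    have h1 : ('A' : Char) ≤ c := hu.1
    have h2 : c ≤ 'Z' := hu.2
    have h1' : 65 ≤ c.toNat := h1
    have h2' : c.toNat ≤ 90 := h2
    have hv : (Char.ofNat (c.toNat + 32)).toNat = 10 := by rw [he]; decide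
    rw [char_ofNat_toNat (c.toNat + 32) (by left; omega)] at hv
    omega
  · rw [if_neg hu]
    exact h

theorem lower_joinNL : ∀ ls : List (List Char),
    PySem.Chars.lower (joinNL ls) = joinNL (ls.map PySem.Chars.lower) := by
  intro ls
  induction ls with
  | nil => rfl
  | cons l rest ih =>
    cases rest with
    | nil => simp [joinNL]
    | cons m t =>
      rw [joinNL_cons_ne _ (by simp)]
      simp only [List.map_cons]
      rw [joinNL_cons_ne (PySem.Chars.lower l) (by simp)]
      simp only [PySem.Chars.lower, List.map_append, List.map_cons, lowerChar_nl] at ih ⊢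
      simp [ih]

theorem nlfree_lower {l : List Char} (h : '\n' ∉ l) : '\n' ∉ PySem.Chars.lower l := by
  intro hm
  obtain ⟨c, hc, he⟩ := List.mem_map.mp hm
  by_cases hcn : c = '\n'
  · exact h (hcn ▸ hc)
  · exact lowerChar_ne_nl hcn he

theorem offL_map_lower : ∀ (lls : List (List Char)) (i : Nat),
    offL (lls.map PySem.Chars.lower) i = offL lls i := by
  intro lls
  induction lls with
  | nil => intro i; cases i <;> rfl
  | cons l r ih =>
    intro i
    cases i with
    | zero => rfl
    | succ i' => simp [offL, ih i', PySem.Chars.lower]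

theorem getD_map_lower_len : ∀ (lls : List (List Char)) (i : Nat),
    ((lls.map PySem.Chars.lower).getD i []).length = (lls.getD i []).length := by
  intro lls
  induction lls with
  | nil => intro i; cases i <;> rfl
  | cons l r ih =>
    intro i
    cases i with
    | zero => simp [PySem.Chars.lower]
    | succ i' =>
      simp only [List.map_cons, List.getD_cons_succ]
      exact ih i'

theorem findIdx?_map' {α β : Type} (p : β → Bool) (f : α → β) :
    ∀ l : List α, List.findIdx? p (l.map f) = List.findIdx? (fun x => p (f x)) l := by
  intro l
  induction l with
  | nil => rfl
  | cons a t ih => simp [List.findIdx?_cons, ih]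

theorem findIdx?_or {α : Type} (p q : α → Bool) :
    ∀ ls : List α, List.findIdx? (fun x => p x || q x) ls
      = (match List.findIdx? p ls, List.findIdx? q ls with
         | none, o => o
         | some a, none => some a
         | some a, some b => some (min a b)) := by
  intro ls
  induction ls with
  | nil => rfl
  | cons x l ih =>
    by_cases hp : p x
    · by_cases hq : q x
      · simp [List.findIdx?_cons, hp, hq]
      · simp only [List.findIdx?_cons, hp, hq, Bool.true_or, if_pos rfl, reduceIte]
        cases List.findIdx? q l <;> simp
    · by_cases hq : q x
      · simp only [List.findIdx?_cons, hp, hq, Bool.false_or, reduceIte]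
        cases List.findIdx? p l <;> simp [Nat.min_def]
      · simp only [List.findIdx?_cons, hp, hq, Bool.false_or, reduceIte, ih]
        cases hP : List.findIdx? p l <;> cases hQ : List.findIdx? q l <;>
          simp [Nat.succ_min_succ]

theorem bstart (lls : List (List Char)) (hnl : ∀ l ∈ lls, '\n' ∉ l) :
    (lls.findIdx? markerC = none →
      ([PySem.Chars.find (joinNL (lls.map PySem.Chars.lower)) "route to".toList,
        PySem.Chars.find (joinNL (lls.map PySem.Chars.lower)) "routes to".toList].filter
          (fun q => q != -1)) = []) ∧
    (∀ st, lls.findIdx? markerC = some st → ∃ p : Nat,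
      PySem.List.min? ([PySem.Chars.find (joinNL (lls.map PySem.Chars.lower)) "route to".toList,
        PySem.Chars.find (joinNL (lls.map PySem.Chars.lower)) "routes to".toList].filter
          (fun q => q != -1)) (fun q => q) = some (p : Int) ∧
      offL lls st ≤ p ∧ p < offL lls st + (lls.getD st []).length ∧ st < lls.length) := by
  have hnlL : ∀ l ∈ lls.map PySem.Chars.lower, '\n' ∉ l := by
    intro l hl
    obtain ⟨x, hx, hxe⟩ := List.mem_map.mp hl
    exact hxe ▸ nlfree_lower (hnl x hx)
  obtain ⟨n1, s1⟩ := fi_join (M := "route to".toList) (by decide) (by decide)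
    (lls.map PySem.Chars.lower) hnlL
  obtain ⟨n2, s2⟩ := fi_join (M := "routes to".toList) (by decide) (by decide)
    (lls.map PySem.Chars.lower) hnlL
  have hmk : lls.findIdx? markerC
      = (match (lls.map PySem.Chars.lower).findIdx? (fun x => PySem.Chars.isIn "route to".toList x),
               (lls.map PySem.Chars.lower).findIdx? (fun x => PySem.Chars.isIn "routes to".toList x) with
         | none, o => o
         | some a, none => some a
         | some a, some b => some (min a b)) := by
    rw [findIdx?_map', findIdx?_map', ← findIdx?_or]
    rfl
  have hlen : (lls.map PySem.Chars.lower).length = lls.length := List.length_map _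
  cases hA : (lls.map PySem.Chars.lower).findIdx? (fun x => PySem.Chars.isIn "route to".toList x) with
  | none =>
    have h1 := n1 hA
    cases hB : (lls.map PySem.Chars.lower).findIdx?
        (fun x => PySem.Chars.isIn "routes to".toList x) with
    | none =>
      have h2 := n2 hB
      constructor
      · intro _
        rw [h1, h2]
        simp [List.filter]
      · intro st hst
        rw [hmk, hA, hB] at hst
        simp at hst
    | some i2 =>
      obtain ⟨f2, hv2, hb2⟩ := s2 i2 hB
      have hi2 : i2 < lls.length := hlen ▸ findIdx?_lt_length hB
      constructor
      · intro hnone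
        rw [hmk, hA, hB] at hnone
        simp at hnone
      · intro st hst
        rw [hmk, hA, hB] at hst
        simp at hst
        subst hst
        refine ⟨offL lls i2 + f2, ?_, by omega, ?_, hi2⟩
        · rw [offL_map_lower] at hv2
          rw [h1, hv2]
          have hq : ((((offL lls i2 + f2 : Nat) : Int)) != -1) = true := by
            simp only [bne_iff_ne, ne_eq]
            omega
          simp only [List.filter, hq]
          rw [show ((-1 : Int) != -1) = false from by decide]
          rw [PySem.List.min?_id_cons]
          simp
        · rw [getD_map_lower_len] at hb2
          have : ("routes to".toList).length = 9 := by decide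
          omega
  | some i1 =>
    obtain ⟨f1, hv1, hb1⟩ := s1 i1 hA
    have hi1 : i1 < lls.length := hlen ▸ findIdx?_lt_length hA
    rw [offL_map_lower] at hv1
    rw [getD_map_lower_len] at hb1
    have hM1len : ("route to".toList).length = 8 := by decide
    cases hB : (lls.map PySem.Chars.lower).findIdx?
        (fun x => PySem.Chars.isIn "routes to".toList x) with
    | none =>
      have h2 := n2 hB
      constructor
      · intro hnone
        rw [hmk, hA, hB] at hnone
        simp at hnone
      · intro st hst
        rw [hmk, hA, hB] at hst
        simp at hst
        subst hst
        refine ⟨offL lls i1 + f1, ?_, by omega, by omega, hi1⟩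
        rw [h2, hv1]
        have hq : ((((offL lls i1 + f1 : Nat) : Int)) != -1) = true := by
          simp only [bne_iff_ne, ne_eq]
          omega
        simp only [List.filter, hq]
        rw [show ((-1 : Int) != -1) = false from by decide]
        rw [PySem.List.min?_id_cons]
        simp
    | some i2 =>
      obtain ⟨f2, hv2, hb2⟩ := s2 i2 hB
      have hi2 : i2 < lls.length := hlen ▸ findIdx?_lt_length hB
      rw [offL_map_lower] at hv2
      rw [getD_map_lower_len] at hb2
      have hM2len : ("routes to".toList).length = 9 := by decide
      constructor
      · intro hnone
        rw [hmk, hA, hB] at hnone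
        simp at hnone
      · intro st hst
        rw [hmk, hA, hB] at hst
        simp at hst
        subst hst
        have hq1 : ((((offL lls i1 + f1 : Nat) : Int)) != -1) = true := by
          simp only [bne_iff_ne, ne_eq]; omega
        have hq2 : ((((offL lls i2 + f2 : Nat) : Int)) != -1) = true := by
          simp only [bne_iff_ne, ne_eq]; omega
        have hfil : ([PySem.Chars.find (joinNL (lls.map PySem.Chars.lower)) "route to".toList,
            PySem.Chars.find (joinNL (lls.map PySem.Chars.lower)) "routes to".toList].filter
              (fun q => q != -1))
            = [((offL lls i1 + f1 : Nat) : Int), ((offL lls i2 + f2 : Nat) : Int)] := by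
          rw [hv1, hv2]
          simp only [List.filter, hq1, hq2]
        rw [hfil, PySem.List.min?_id_cons]
        simp only [List.foldl_cons, List.foldl_nil]
        rcases lt_trichotomy i1 i2 with hlt | heq | hgt
        · have hmono := offL_mono lls i1 i2 hlt (by omega)
          rw [Nat.min_eq_left (Nat.le_of_lt hlt)]
          have hminv : min (((offL lls i1 + f1 : Nat) : Int)) (((offL lls i2 + f2 : Nat) : Int))
              = ((offL lls i1 + f1 : Nat) : Int) := by
            rw [min_eq_left]
            push_cast
            omega
          exact ⟨offL lls i1 + f1, by rw [hminv], by omega, by omega, by omega⟩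
        · subst heq
          rw [Nat.min_self]
          have hle1 := Nat.min_le_left f1 f2
          have hle2 := Nat.min_le_right f1 f2
          refine ⟨offL lls i1 + min f1 f2, ?_, by omega, by omega, by omega⟩
          congr 1
          push_cast
          omega
        · have hmono := offL_mono lls i2 i1 hgt (by omega)
          rw [Nat.min_eq_right (Nat.le_of_lt hgt)]
          have hminv : min (((offL lls i1 + f1 : Nat) : Int)) (((offL lls i2 + f2 : Nat) : Int))
              = ((offL lls i2 + f2 : Nat) : Int) := by
            rw [min_eq_right]
            push_cast
            omega
          exact ⟨offL lls i2 + f2, by rw [hminv], by omega, by omega, by omega⟩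


-- ---- B's port equals the line-level description ----

theorem ersBchar_eq (cs : List Char) :
    ersBchar cs = (match (pvLines cs).findIdx? markerC with
      | none => []
      | some st => lineResult ((pvLines cs).drop st)) := by
  have hnl := nlfree_pvLines cs
  have hj : joinNL (pvLines cs) = cs := joinNL_pvLines cs
  obtain ⟨bn, bs⟩ := bstart (pvLines cs) hnl
  have hlow : PySem.Chars.lower cs = joinNL ((pvLines cs).map PySem.Chars.lower) := by
    rw [← hj, lower_joinNL, hj]
  simp only [ersBchar]
  rw [hlow]
  cases hfi : (pvLines cs).findIdx? markerC with
  | none =>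
    rw [bn hfi]
    rfl
  | some st =>
    obtain ⟨p, hmin, hp1, hp2, hstlt⟩ := bs st hfi
    rw [hmin]
    have hrf : PySem.Chars.rfindFrom cs ['\n'] 0 (some (p : Int))
        = ((offL (pvLines cs) st : Nat) : Int) - 1 := by
      conv_lhs => rw [← hj]
      exact rfind_line_start hnl hstlt hp1 (by omega)
    show ersB3 cs ((PySem.Chars.rfindFrom cs ['\n'] 0 (some (p : Int)) + 1).toNat) 3
        ((PySem.Chars.rfindFrom cs ['\n'] 0 (some (p : Int)) + 1).toNat)
      = lineResult ((pvLines cs).drop st)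
    rw [hrf]
    have hsol : (((offL (pvLines cs) st : Nat) : Int) - 1 + 1).toNat = offL (pvLines cs) st := by
      omega
    rw [hsol]
    obtain ⟨pre, hsp, hplen, -, -⟩ := split_at_off (pvLines cs) st hstlt
    rw [hj] at hsp
    have hdne : (pvLines cs).drop st ≠ [] := by
      intro hc
      have := congrArg List.length hc
      simp at this
      omega
    have hdnl : ∀ l ∈ (pvLines cs).drop st, '\n' ∉ l := fun l hl =>
      hnl l (List.mem_of_mem_drop hl)
    rw [← hplen]
    conv_lhs => rw [hsp]
    exact ersB3_thm ((pvLines cs).drop st) pre hdne hdnl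

-- ---- A's loop, at the line level (as in the line-by-line port) ----

def pvCollect : List String → Nat → List String
  | [], _ => []
  | l :: rest, n => l :: (if pvBlank l && decide (3 < n + 1) then [] else pvCollect rest (n + 1))

theorem ersLoopA_true (rest : List String) : ∀ acc : List String,
    ersLoopA rest true acc = acc ++ pvCollect rest acc.length := by
  induction rest with
  | nil => intro acc; simp [ersLoopA, pvCollect]
  | cons l rest ih =>
    intro acc
    simp only [ersLoopA, pvCollect, ite_self]
    by_cases h : pvBlank l = true ∧ 3 ≤ acc.length
    · simp [h]
    · simp [h, ih]

theorem pvCollect_ge3 (r : List String) : ∀ n : Nat, 3 ≤ n →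
    pvCollect r n = (match r.findIdx? pvBlank with
      | some j => r.take (j + 1)
      | none => r) := by
  induction r with
  | nil => intro n _; simp [pvCollect]
  | cons l rest ih =>
    intro n hn
    by_cases h : pvBlank l = true
    · simp [pvCollect, h, List.findIdx?_cons, show (3 < n + 1) by omega]
    · have hb : pvBlank l = false := by simpa using h
      simp only [pvCollect, List.findIdx?_cons, hb, Bool.false_and, Bool.false_eq_true, if_false]
      rw [ih (n + 1) (by omega)]
      cases rest.findIdx? pvBlank with
      | none => rfl
      | some j => simp

theorem pvCollect_one (r : List String) :
    pvCollect r 1 = (match (r.drop 2).findIdx? pvBlank with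
      | some j => r.take (j + 3)
      | none => r) := by
  match r with
  | [] => simp [pvCollect]
  | [a] => simp [pvCollect]
  | a :: b :: r' =>
    have h3 := pvCollect_ge3 r' 3 (by omega)
    simp only [pvCollect, List.drop_succ_cons, List.drop_zero]
    rw [h3]
    cases h : r'.findIdx? pvBlank with
    | none => simp
    | some j =>
      simp [show j + 3 = (j + 2) + 1 by omega, show j + 2 = (j + 1) + 1 by omega,
        List.take_succ_cons]

theorem ersLoopA_main (lines : List String) :
    ersLoopA lines false [] = (match lines.findIdx? pvMarker with
      | none => []
      | some start =>
        let tail := lines.drop start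
        let e := match (tail.drop 3).findIdx? pvBlank with
          | some j => 3 + j
          | none => tail.length - 1
        tail.take (e + 1)) := by
  induction lines with
  | nil => simp [ersLoopA]
  | cons l rest ih =>
    by_cases hm : pvMarker l = true
    · rw [show List.findIdx? pvMarker (l :: rest) = some 0 by
        simp [List.findIdx?_cons, hm]]
      have step : ersLoopA (l :: rest) false [] = l :: pvCollect rest 1 := by
        simp [ersLoopA, hm, ersLoopA_true]
      rw [step, pvCollect_one]
      simp only [List.drop_zero, List.drop_succ_cons, List.length_cons]
      cases h : (rest.drop 2).findIdx? pvBlank with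
      | none =>
        simp only [Nat.add_sub_cancel]
        rw [List.take_succ_cons, List.take_length]
      | some j =>
        rw [show 3 + j + 1 = (j + 3) + 1 by omega, List.take_succ_cons]
    · have step : ersLoopA (l :: rest) false [] = ersLoopA rest false [] := by
        simp [ersLoopA, hm]
      rw [step, ih]
      have hm' : pvMarker l = false := by simpa using hm
      simp only [List.findIdx?_cons, hm', Bool.false_eq_true, if_false]
      cases rest.findIdx? pvMarker with
      | none => rfl
      | some j => simp only [Option.map_some, List.drop_succ_cons]

-- ---- String-level bridges ----

theorem marker_ofList (l : List Char) : pvMarker (String.ofList l) = markerC l := by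
  simp [pvMarker, markerC, PySem.Str.isIn]

theorem blank_ofList (l : List Char) : pvBlank (String.ofList l) = blankC l := by
  simp only [pvBlank, blankC]
  rcases hb : PySem.Chars.strip l == [] with _ | _
  · simp only [beq_eq_false_iff_ne, ne_eq] at hb
    simp only [beq_eq_false_iff_ne, ne_eq, beq_iff_eq]
    intro hc
    apply hb
    have := congrArg String.toList hc
    simpa [PySem.Str.strip] using this
  · simp only [beq_iff_eq] at hb
    simp [PySem.Str.strip, hb]

theorem join_ofList (Y : List (List Char)) :
    PySem.Str.join "\n" (Y.map String.ofList) = String.ofList (joinNL Y) := by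
  unfold PySem.Str.join
  rw [show List.map String.toList (List.map String.ofList Y) = Y from by
    rw [List.map_map]
    simp [Function.comp_def, String.toList_ofList]]
  unfold PySem.Chars.join
  rw [show ("\n" : String).toList = ['\n'] from rfl, intercalate_eq_joinNL]

-- ===== VERDICT (by name: the statement is the Claim_ definition above) =====
theorem extract_routing_section_spec : Claim_equal_extract_routing_section := by
  intro prompt _
  unfold Spec_extract_routing_section extract_routing_section extract_routing_section_alt
  rw [ersLoopA_main, ersBchar_eq]
  have hsplit : PySem.Str.split? prompt "\n"
      = some ((pvLines prompt.toList).map String.ofList) := by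
    unfold PySem.Str.split? PySem.Chars.split?
    rw [show ("\n" : String).toList = ['\n'] from rfl, if_neg (by simp), splitOn_eq_pvLines]
    rfl
  rw [hsplit]
  simp only [Option.getD_some]
  have hfm : List.findIdx? pvMarker ((pvLines prompt.toList).map String.ofList)
      = (pvLines prompt.toList).findIdx? markerC := by
    rw [findIdx?_map', show (fun l => pvMarker (String.ofList l)) = markerC from
      funext marker_ofList]
  rw [hfm]
  cases hfi : (pvLines prompt.toList).findIdx? markerC with
  | none => rfl
  | some st =>
    show PySem.Str.join "\n"
        ((((pvLines prompt.toList).map String.ofList).drop st).take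
          ((match ((((pvLines prompt.toList).map String.ofList).drop st).drop 3).findIdx? pvBlank with
            | some j => 3 + j
            | none => (((pvLines prompt.toList).map String.ofList).drop st).length - 1) + 1))
      = String.ofList (lineResult ((pvLines prompt.toList).drop st))
    rw [show ((pvLines prompt.toList).map String.ofList).drop st
        = ((pvLines prompt.toList).drop st).map String.ofList from by
      rw [List.map_drop]]
    rw [show (((pvLines prompt.toList).drop st).map String.ofList).drop 3
        = (((pvLines prompt.toList).drop st).drop 3).map String.ofList from by
      simp [List.map_drop]]
    rw [findIdx?_map', show (fun l => pvBlank (String.ofList l)) = blankC from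
      funext blank_ofList]
    rw [show ((((pvLines prompt.toList).drop st).map String.ofList)).length
        = ((pvLines prompt.toList).drop st).length from by simp]
    rw [show ∀ k, ((((pvLines prompt.toList).drop st).map String.ofList).take k)
        = (((pvLines prompt.toList).drop st).take k).map String.ofList from fun k => by
      rw [List.map_take]]
    rw [join_ofList]
    rfl
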